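-- pv_equiv track=rewrite | github.com/treangenlab/somatem | bin/build_contigs.py | find_coverage_gaps
-- ===== SOURCE A (Python) =====
-- from typing import Dict, List, Tuple
--
-- def find_coverage_gaps(
--     depths: Dict[str, List[int]],
--     min_cov: int,
--     min_gap_len: int,
-- ) -> Dict[str, List[Tuple[int, int]]]:
--     """Find coverage gaps (runs of depth < min_cov with length >= min_gap_len)."""
--     gaps: Dict[str, List[Tuple[int, int]]] = {}
--
--     for chrom, arr in depths.items():
--         chrom_gaps: List[Tuple[int, int]] = []
--         in_gap = False
--         gap_start = 0
--
--         for i, d in enumerate(arr):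
--             pos = i + 1
--             if d < min_cov:
--                 if not in_gap:
--                     in_gap = True
--                     gap_start = pos
--             else:
--                 if in_gap:
--                     gap_end = pos - 1
--                     if gap_end - gap_start + 1 >= min_gap_len:
--                         chrom_gaps.append((gap_start, gap_end))
--                     in_gap = False
--
--         if in_gap:
--             gap_end = len(arr)
--             if gap_end - gap_start + 1 >= min_gap_len:
--                 chrom_gaps.append((gap_start, gap_end))
--
--         gaps[chrom] = chrom_gaps
--
--     return gaps
-- ===== SOURCE B (Python) =====
-- from typing import Dict, List, Tuple
--
-- def find_coverage_gaps(
--     depths: Dict[str, List[int]],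
--     min_cov: int,
--     min_gap_len: int,
-- ) -> Dict[str, List[Tuple[int, int]]]:
--     """Boundary-detection reformulation: build the low-coverage mask, detect run
--     starts (low with non-low predecessor) and run ends (low with non-low successor)
--     as two separate filtered passes, zip them into runs, and keep the long ones."""
--     gaps: Dict[str, List[Tuple[int, int]]] = {}
--     for chrom, arr in depths.items():
--         low = [d < min_cov for d in arr]
--         starts = [i for i, (c, p) in enumerate(zip(low, [False] + low), 1) if c and not p]
--         ends = [i for i, (c, nx) in enumerate(zip(low, low[1:] + [False]), 1) if c and not nx]
--         gaps[chrom] = [(s, e) for s, e in zip(starts, ends) if e - s + 1 >= min_gap_len]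
--     return gaps
-- ===== Notes on version B (the rewrite author's own statement) =====
-- stated objective: alternative
-- what changed: Replaces the in_gap/gap_start state machine with its separate trailing-run cleanup by staged passes: build the low-coverage boolean mask, detect run starts (low with non-low predecessor) and run ends (low with non-low successor) as two neighbour-comparison comprehensions, zip starts with ends into runs, and filter by minimum length.
import Mathlib
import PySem

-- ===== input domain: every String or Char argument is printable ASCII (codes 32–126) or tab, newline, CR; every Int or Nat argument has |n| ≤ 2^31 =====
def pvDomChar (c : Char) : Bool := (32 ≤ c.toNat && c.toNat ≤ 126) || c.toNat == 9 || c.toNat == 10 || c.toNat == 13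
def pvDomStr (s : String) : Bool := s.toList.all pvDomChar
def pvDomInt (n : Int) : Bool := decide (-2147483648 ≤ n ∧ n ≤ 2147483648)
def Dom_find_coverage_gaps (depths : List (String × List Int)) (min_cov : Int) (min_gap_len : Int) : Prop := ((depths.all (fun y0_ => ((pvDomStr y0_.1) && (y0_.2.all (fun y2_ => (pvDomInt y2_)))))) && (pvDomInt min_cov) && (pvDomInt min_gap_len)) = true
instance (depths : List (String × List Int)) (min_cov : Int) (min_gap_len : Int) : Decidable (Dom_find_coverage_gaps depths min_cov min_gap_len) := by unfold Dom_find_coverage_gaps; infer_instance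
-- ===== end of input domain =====

-- B replaces A's in_gap/gap_start state machine (with its separate trailing-run cleanup)
-- by staged passes: a low-coverage mask, boundary detection of run starts and run ends by
-- neighbour comparison, zip into runs, filter by length; same O(n) cost, different decomposition.


-- ===== PORT A =====
-- inner 'for i, d in enumerate(arr)' loop, carrying (chrom_gaps, in_gap, gap_start)
def loopA (min_cov min_gap_len : Int) : List Int → Int → (List (Int × Int) × Bool × Int) → (List (Int × Int) × Bool × Int)
  | [], _, st => st
  | d :: rest, i, (cg, in_gap, gs) =>
      let pos := i + 1
      let st' :=
        if d < min_cov then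
          if in_gap = false then (cg, true, pos) else (cg, in_gap, gs)
        else
          if in_gap = true then
            let ge := pos - 1
            ((if ge - gs + 1 ≥ min_gap_len then cg ++ [(gs, ge)] else cg), false, gs)
          else (cg, in_gap, gs)
      loopA min_cov min_gap_len rest (i + 1) st'

-- body of the outer loop for one chromosome: the scan plus the trailing 'if in_gap' cleanup
def chromA (min_cov min_gap_len : Int) (arr : List Int) : List (Int × Int) :=
  let st := loopA min_cov min_gap_len arr 0 ([], false, 0)
  if st.2.1 = true then
    if (arr.length : Int) - st.2.2 + 1 ≥ min_gap_len then st.1 ++ [(st.2.2, (arr.length : Int))]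
    else st.1
  else st.1

def find_coverage_gaps (depths : List (String × List Int)) (min_cov : Int) (min_gap_len : Int) : List (String × List (Int × Int)) :=
  (depths.foldl (fun (gaps : PySem.Dict String (List (Int × Int))) p =>
    gaps.insert p.1 (chromA min_cov min_gap_len p.2)) PySem.Dict.empty).items

-- ===== PORT B =====
-- one chromosome of Source B: low mask, starts = low with non-low predecessor
-- (zip low with [False]+low), ends = low with non-low successor (zip low with
-- low[1:]+[False]), both as enumerate(·,1) comprehensions; zip and length-filter.
def chromB (min_cov min_gap_len : Int) (arr : List Int) : List (Int × Int) :=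
  let low := arr.map (fun d => decide (d < min_cov))
  let starts := ((low.zip (false :: low)).zipIdx 1).filterMap
      (fun x => if x.1.1 && !x.1.2 then some ((x.2 : Int)) else none)
  let ends := ((low.zip (low.drop 1 ++ [false])).zipIdx 1).filterMap
      (fun x => if x.1.1 && !x.1.2 then some ((x.2 : Int)) else none)
  (starts.zip ends).filter (fun p => decide (p.2 - p.1 + 1 ≥ min_gap_len))

def find_coverage_gaps_alt (depths : List (String × List Int)) (min_cov : Int) (min_gap_len : Int) : List (String × List (Int × Int)) :=
  (depths.foldl (fun (gaps : PySem.Dict String (List (Int × Int))) p =>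
    gaps.insert p.1 (chromB min_cov min_gap_len p.2)) PySem.Dict.empty).items

-- ===== PRECONDITION & SPEC =====
def Spec_find_coverage_gaps (depths : List (String × List Int)) (min_cov : Int) (min_gap_len : Int) (out : List (String × List (Int × Int))) : Prop := out = find_coverage_gaps_alt depths min_cov min_gap_len
instance (depths : List (String × List Int)) (min_cov : Int) (min_gap_len : Int) (out : List (String × List (Int × Int))) : Decidable (Spec_find_coverage_gaps depths min_cov min_gap_len out) := by unfold Spec_find_coverage_gaps; infer_instance

-- ===== CLAIM (what is proved, stated in full; the proofs are below) =====
def Claim_equal_find_coverage_gaps : Prop := ∀ (depths : List (String × List Int)) (min_cov : Int) (min_gap_len : Int), Dom_find_coverage_gaps depths min_cov min_gap_len → Spec_find_coverage_gaps depths min_cov min_gap_len (find_coverage_gaps depths min_cov min_gap_len)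

-- ===== LEMMAS AND PROOFS =====

-- recursive characterisations of B's boundary comprehensions
def startsRec : List Bool → Bool → Int → List Int
  | [], _, _ => []
  | b :: bs, prev, pos => (if b && !prev then [pos] else []) ++ startsRec bs b (pos + 1)

def endsRec : List Bool → Int → List Int
  | [], _ => []
  | b :: bs, pos => (if b && !(bs.headD false) then [pos] else []) ++ endsRec bs (pos + 1)

def runsF (min_gap_len : Int) (bs : List Bool) (prev : Bool) (pos : Int) : List (Int × Int) :=
  ((startsRec bs prev pos).zip (endsRec bs pos)).filter (fun p => decide (p.2 - p.1 + 1 ≥ min_gap_len))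

-- ends list seen from inside a gap whose last low element so far sits at position iPrev
def endsExt (bs : List Bool) (pos iPrev : Int) : List Int :=
  if bs.headD false then endsRec bs pos else iPrev :: endsRec bs pos

theorem starts_bridge (bs : List Bool) (prev : Bool) (k : Nat) :
    ((bs.zip (prev :: bs)).zipIdx k).filterMap
      (fun x => if x.1.1 && !x.1.2 then some ((x.2 : Int)) else none) =
    startsRec bs prev (k : Int) := by
  induction bs generalizing prev k with
  | nil => rfl
  | cons b bs ih =>
      simp only [List.zip_cons_cons, List.zipIdx, List.filterMap_cons, startsRec]
      rw [ih b (k + 1)]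
      cases hb : b && !prev <;> simp [hb]


theorem ends_bridge (bs : List Bool) (k : Nat) :
    ((bs.zip (bs.drop 1 ++ [false])).zipIdx k).filterMap
      (fun x => if x.1.1 && !x.1.2 then some ((x.2 : Int)) else none) =
    endsRec bs (k : Int) := by
  induction bs generalizing k with
  | nil => rfl
  | cons b bs ih =>
      have hz : (b :: bs).zip ((b :: bs).drop 1 ++ [false]) =
          (b, bs.headD false) :: bs.zip (bs.drop 1 ++ [false]) := by
        cases bs <;> simp
      rw [hz]
      simp only [List.zipIdx, List.filterMap_cons, endsRec]
      rw [ih (k + 1)]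
      cases hb : b && !(bs.headD false) <;> simp [hb]

-- A's scan over a suffix starting at index i, followed by the trailing cleanup
def tailA (min_cov min_gap_len : Int) (arr : List Int) (i : Int) (st : List (Int × Int) × Bool × Int) : List (Int × Int) :=
  let st' := loopA min_cov min_gap_len arr i st
  if st'.2.1 = true then
    if (i + arr.length) - st'.2.2 + 1 ≥ min_gap_len then st'.1 ++ [(st'.2.2, i + arr.length)]
    else st'.1
  else st'.1

theorem chromA_eq_tailA (mc mgl : Int) (arr : List Int) :
    chromA mc mgl arr = tailA mc mgl arr 0 ([], false, 0) := by
  simp [chromA, tailA]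

theorem tailA_cons (mc mgl : Int) (d : Int) (rest : List Int) (i : Int) (cg : List (Int × Int)) (g : Bool) (gs : Int) :
    tailA mc mgl (d :: rest) i (cg, g, gs) =
      tailA mc mgl rest (i + 1)
        (if d < mc then (if g = false then (cg, true, i + 1) else (cg, g, gs))
         else if g = true then ((if (i + 1) - 1 - gs + 1 ≥ mgl then cg ++ [(gs, (i + 1) - 1)] else cg), false, gs)
         else (cg, g, gs)) := by
  have hl : (i + ((d :: rest).length : Int)) = (i + 1) + (rest.length : Int) := by
    push_cast [List.length_cons]; ring
  simp only [tailA, loopA, hl]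

-- main invariant: G (not in a gap; previous element, if any, was high) and
-- H (inside a gap started at gs; previous element was low), mutually on the tail
theorem mainInv (mc mgl : Int) (arr : List Int) :
    (∀ (i : Int) (cg : List (Int × Int)) (gs : Int),
        tailA mc mgl arr i (cg, false, gs) =
          cg ++ runsF mgl (arr.map (fun d => decide (d < mc))) false (i + 1)) ∧
    (∀ (i : Int) (cg : List (Int × Int)) (gs : Int),
        tailA mc mgl arr i (cg, true, gs) =
          cg ++ ((gs :: startsRec (arr.map (fun d => decide (d < mc))) true (i + 1)).zip
                  (endsExt (arr.map (fun d => decide (d < mc))) (i + 1) i)).filter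
                (fun p => decide (p.2 - p.1 + 1 ≥ mgl))) := by
  induction arr with
  | nil =>
      constructor
      · intro i cg gs; simp [tailA, loopA, runsF, startsRec, endsRec]
      · intro i cg gs
        simp only [List.map_nil, endsExt, List.headD_nil, if_neg Bool.false_ne_true, endsRec,
          tailA, loopA]
        by_cases h : i - gs + 1 ≥ mgl
        · simp [h, List.filter]
        · simp [h, List.filter]
  | cons d rest ih =>
      obtain ⟨ihG, ihH⟩ := ih
      by_cases hd : d < mc
      · constructor
        · -- G, low head: enter a gap starting at i+1
          intro i cg gs
          rw [tailA_cons, if_pos hd, if_pos rfl, ihH (i + 1) cg (i + 1)]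
          cases hre : rest.head? with
          | none => simp [runsF, startsRec, endsRec, endsExt, hd, hre]
          | some e =>
              by_cases he : e < mc <;>
                simp [runsF, startsRec, endsRec, endsExt, hd, hre, he]
        · -- H, low head: the gap continues
          intro i cg gs
          rw [tailA_cons, if_pos hd, if_neg (by decide), ihH (i + 1) cg gs]
          cases hre : rest.head? with
          | none => simp [startsRec, endsRec, endsExt, hd, hre]
          | some e =>
              by_cases he : e < mc <;>
                simp [startsRec, endsRec, endsExt, hd, hre, he]
      · constructor
        · -- G, high head: nothing changes
          intro i cg gs
          rw [tailA_cons, if_neg hd, if_neg (by decide), ihG (i + 1) cg gs]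
          simp [runsF, startsRec, endsRec, hd]
        · -- H, high head: the gap closes at position i
          intro i cg gs
          rw [tailA_cons, if_neg hd, if_pos rfl,
            ihG (i + 1) (if (i + 1) - 1 - gs + 1 ≥ mgl then cg ++ [(gs, (i + 1) - 1)] else cg) gs]
          have h1 : (i + 1) - 1 = i := by ring
          simp only [h1, List.map_cons, hd, decide_false, startsRec, Bool.false_and,
            List.nil_append, endsExt, List.headD_cons, if_neg (by decide : ¬ (false = true)),
            endsRec, List.zip_cons_cons, List.filter, runsF]
          by_cases h : i - gs + 1 ≥ mgl
          · simp [h, List.append_assoc]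
          · simp [h]

theorem chrom_eq (mc mgl : Int) (arr : List Int) :
    chromA mc mgl arr = chromB mc mgl arr := by
  rw [chromA_eq_tailA, (mainInv mc mgl arr).1 0 [] 0]
  show runsF mgl _ false 1 = chromB mc mgl arr
  rw [chromB]
  rw [starts_bridge (arr.map (fun d => decide (d < mc))) false 1,
    ends_bridge (arr.map (fun d => decide (d < mc))) 1]
  rfl

theorem fold_eq (mc mgl : Int) (depths : List (String × List Int)) (d : PySem.Dict String (List (Int × Int))) :
    depths.foldl (fun gaps p => gaps.insert p.1 (chromA mc mgl p.2)) d =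
    depths.foldl (fun gaps p => gaps.insert p.1 (chromB mc mgl p.2)) d := by
  simp only [chrom_eq]

-- ===== VERDICT (by name: the statement is the Claim_ definition above) =====
theorem find_coverage_gaps_spec : Claim_equal_find_coverage_gaps := by
  intro depths mc mgl _
  unfold Spec_find_coverage_gaps find_coverage_gaps find_coverage_gaps_alt
  rw [fold_eq]
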